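-- pv_equiv track=rewrite | github.com/LaughD/Algorithm-Coding-test-Study | programmers/SummerWinter Coding(~2018)/지형 편집(Level4).py | solution
-- ===== SOURCE A (Python) =====
-- from collections import Counter
-- from itertools import chain
--
-- def solution(land, P, Q) -> int:
--     flattened_land: list = list(chain.from_iterable(land))
--     all_cells: int = len(land)**2
--     stacked_cells: int = 0
--     cost: int = Q * sum(flattened_land)
--     min_cost: int = cost
--     prev_height: int = 0
--
--     for height, cells in sorted(Counter(flattened_land).items()):
--         cost += (height - prev_height) \
--                 * (-Q * (all_cells-stacked_cells) + P * stacked_cells)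
--         if min_cost < cost:
--             break
--         stacked_cells += cells
--         min_cost = cost
--         prev_height = height
--     return min_cost
-- ===== SOURCE B (Python) =====
-- def solution(land, P, Q) -> int:
--     # Level the NxN terrain to some height h; removing a unit costs Q, adding costs P.
--     # cost(h) = Q*(S - N*h) + (P+Q) * sum of (h - c) over cells below h.
--     # Scan candidate heights in increasing order, recomputing the full cost each
--     # time from the raw cells; stop as soon as the cost rises above the best seen.
--     cells = [c for row in land for c in row]
--     N = len(land) ** 2
--     S = sum(cells)
--     best = Q * S
--     for h in sorted(set(cells)):
--         cost = Q * (S - N * h) + (P + Q) * sum(h - c for c in cells if c < h)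
--         if cost > best:
--             break
--         best = cost
--     return best
-- ===== Notes on version B (the rewrite author's own statement) =====
-- stated objective: alternative
-- what changed: B drops the Counter and the incremental cost/stacked_cells/prev_height bookkeeping: for each candidate height (sorted distinct cell values) it recomputes the full levelling cost Q*(S-N*h)+(P+Q)*sum(h-c for cells below h) by rescanning all cells, keeping a running minimum with the same early stop.
import Mathlib
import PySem

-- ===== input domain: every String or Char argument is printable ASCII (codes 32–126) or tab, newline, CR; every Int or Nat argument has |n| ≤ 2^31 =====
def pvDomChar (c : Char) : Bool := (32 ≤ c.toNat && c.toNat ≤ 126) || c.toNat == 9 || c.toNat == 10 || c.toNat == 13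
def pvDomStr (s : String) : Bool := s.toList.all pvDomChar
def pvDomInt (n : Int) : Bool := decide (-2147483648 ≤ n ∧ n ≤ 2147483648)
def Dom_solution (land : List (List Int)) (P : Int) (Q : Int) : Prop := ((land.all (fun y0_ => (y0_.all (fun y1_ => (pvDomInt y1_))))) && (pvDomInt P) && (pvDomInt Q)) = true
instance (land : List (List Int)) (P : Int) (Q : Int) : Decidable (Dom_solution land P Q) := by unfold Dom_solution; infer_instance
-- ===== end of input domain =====

-- B replaces A's Counter + incremental cost/stacked-cells sweep by recomputing each
-- candidate height's full cost from the raw cells (same sorted order, same early stop).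


-- ===== PORT A =====
-- the for-loop over sorted(Counter(...).items()) with its early break
def solutionLoop (allCells P Q : Int) : List (Int × Int) → Int → Int → Int → Int → Int
  | [], _, _, minCost, _ => minCost
  | (height, cells) :: rest, stacked, cost, minCost, prev =>
      let cost' := cost + (height - prev) * (-Q * (allCells - stacked) + P * stacked)
      if minCost < cost' then minCost
      else solutionLoop allCells P Q rest (stacked + cells) cost' cost' height

def solution (land : List (List Int)) (P : Int) (Q : Int) : Int :=
  let flattened : List Int := land.flatMap (fun row => row)
  let allCells : Int := (land.length : Int) ^ 2
  let stacked : Int := 0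
  let cost : Int := Q * flattened.sum
  let minCost : Int := cost
  let prev : Int := 0
  solutionLoop allCells P Q
    (PySem.List.sorted2 (PySem.Dict.counter flattened).items Prod.fst Prod.snd)
    stacked cost minCost prev

-- ===== PORT B =====
-- cost to level everything to height h, recomputed from the raw cells
def altCost (cells : List Int) (N S P Q h : Int) : Int :=
  Q * (S - N * h) + (P + Q) * ((cells.filter (fun c => c < h)).map (fun c => h - c)).sum

def altLoop (cells : List Int) (N S P Q : Int) : List Int → Int → Int
  | [], best => best
  | h :: rest, best =>
      let cost := altCost cells N S P Q h
      if cost > best then best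
      else altLoop cells N S P Q rest cost

def solution_alt (land : List (List Int)) (P : Int) (Q : Int) : Int :=
  let cells : List Int := land.flatMap (fun row => row)
  let N : Int := (land.length : Int) ^ 2
  let S : Int := cells.sum
  altLoop cells N S P Q (PySem.List.sorted (PySem.Set.ofList cells) (fun x => x)) (Q * S)

-- ===== PRECONDITION & SPEC =====
def Spec_solution (land : List (List Int)) (P : Int) (Q : Int) (out : Int) : Prop := out = solution_alt land P Q
instance (land : List (List Int)) (P : Int) (Q : Int) (out : Int) : Decidable (Spec_solution land P Q out) := by unfold Spec_solution; infer_instance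

-- ===== CLAIM (what is proved, stated in full; the proofs are below) =====
def Claim_equal_solution : Prop := ∀ (land : List (List Int)) (P : Int) (Q : Int), Dom_solution land P Q → Spec_solution land P Q (solution land P Q)

-- ===== LEMMAS AND PROOFS =====

-- number of cells below h, and their sum (as Int)
def cntLt (cells : List Int) (h : Int) : Int := ((cells.filter (fun c => c < h)).length : Int)
def sLt (cells : List Int) (h : Int) : Int := (cells.filter (fun c => c < h)).sum

lemma sum_map_const_sub (h : Int) : ∀ (l : List Int), (l.map (fun c => h - c)).sum = h * (l.length : Int) - l.sum := by
  intro l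
  induction l with
  | nil => simp
  | cons x t ih => simp [ih]; ring

lemma altCost_eq (cells : List Int) (N S P Q h : Int) :
    altCost cells N S P Q h = Q * (S - N * h) + (P + Q) * (h * cntLt cells h - sLt cells h) := by
  simp [altCost, cntLt, sLt, sum_map_const_sub]

-- insertBy only compares against list members
lemma insertBy_congr {α : Type} (f g : α → α → Bool) (x : α) :
    ∀ (ys : List α), (∀ y ∈ ys, f x y = g x y) →
      PySem.List.insertBy f x ys = PySem.List.insertBy g x ys := by
  intro ys
  induction ys with
  | nil => intro _; rfl
  | cons y t ih =>
      intro h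
      simp only [PySem.List.insertBy]
      rw [h y (by simp)]
      by_cases hb : g x y = true
      · simp [hb]
      · simp only [Bool.not_eq_true] at hb
        simp [hb, ih (fun z hz => h z (by simp [hz]))]

lemma mem_insertBy_sub {α : Type} (f : α → α → Bool) (x : α) (ys : List α) :
    ∀ z ∈ PySem.List.insertBy f x ys, z = x ∨ z ∈ ys := by
  intro z hz
  rw [PySem.List.mem_insertBy] at hz
  exact hz

lemma foldl_insertBy_congr {α : Type} (f g : α → α → Bool) :
    ∀ (xs acc : List α),
      (∀ a ∈ xs, ∀ b, (b ∈ acc ∨ b ∈ xs) → f a b = g a b) →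
      xs.foldl (fun acc x => PySem.List.insertBy f x acc) acc
        = xs.foldl (fun acc x => PySem.List.insertBy g x acc) acc := by
  intro xs
  induction xs with
  | nil => intro _ _; rfl
  | cons x t ih =>
      intro acc h
      simp only [List.foldl_cons]
      rw [insertBy_congr f g x acc (fun y hy => h x (by simp) y (Or.inl hy))]
      apply ih
      intro a ha b hb
      apply h a (by simp [ha])
      rcases hb with hb | hb
      · rcases mem_insertBy_sub g x acc b hb with hb | hb
        · exact Or.inr (by simp [hb])
        · exact Or.inl hb
      · exact Or.inr (by simp [hb])

-- on a list whose first components are pairwise distinct, Python's tuple sort is a sort by first component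
lemma sorted2_eq_sorted_fst (xs : List (Int × Int)) (hnd : (xs.map Prod.fst).Nodup) :
    PySem.List.sorted2 xs Prod.fst Prod.snd = PySem.List.sorted xs Prod.fst := by
  show xs.foldl _ [] = xs.foldl _ []
  apply foldl_insertBy_congr
  intro a ha b hb
  simp only [List.mem_nil_iff, false_or] at hb
  by_cases hab : a.1 = b.1
  · have hab' : a = b := (List.inj_on_of_nodup_map hnd) ha hb hab
    subst hab'
    simp
  · rcases lt_or_gt_of_ne hab with hlt | hgt
    · simp [hlt]
    · have h1 : ¬ a.1 < b.1 := by omega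
      simp [h1, hgt]

lemma sorted_counter_items (cells : List Int) :
    PySem.List.sorted2 (PySem.Dict.counter cells).items Prod.fst Prod.snd
      = (PySem.List.sorted (PySem.Set.ofList cells) (fun x => x)).map
          (fun k => (k, (cells.count k : Int))) := by
  rw [PySem.Dict.items_counter]
  rw [sorted2_eq_sorted_fst]
  · apply PySem.List.sorted_eq_of_perm_of_pairwise_lt
    · exact List.Perm.map _ (PySem.List.sorted_perm (PySem.Set.ofList cells) (fun x => x) false)
    · have hp := PySem.List.sorted_ofList_pairwise_lt (κ := Int) cells
      exact List.Pairwise.map _ (by intro a b hab; simpa using hab) hp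
  · have : ((PySem.Set.ofList cells).map (fun k => (k, (cells.count k : Int)))).map Prod.fst
        = PySem.Set.ofList cells := by
      simp [List.map_map, Function.comp_def]
    rw [this]
    exact PySem.Set.nodup_ofList cells

-- splitting the below-h' cells into below-h and equal-h
lemma filter_lt_split (cells : List Int) (h h' : Int) (hlt : h < h')
    (hmid : ∀ c ∈ cells, c < h' → c ≤ h) :
    cells.filter (fun c => c < h') = cells.filter (fun c => c < h || c == h) := by
  apply List.filter_congr
  intro c hc
  by_cases h1 : c < h'
  · have h2 : c ≤ h := hmid c hc h1
    by_cases h3 : c = h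
    · simp [h3, hlt]
    · have : c < h := by omega
      simp [h1, this]
  · have h2 : ¬ c < h := by omega
    have h3 : c ≠ h := by omega
    simp [h1, h2, h3]

lemma countP_or_disjoint (p q : Int → Bool) (hd : ∀ c, ¬(p c = true ∧ q c = true)) :
    ∀ (l : List Int), l.countP (fun c => p c || q c) = l.countP p + l.countP q := by
  intro l
  induction l with
  | nil => simp
  | cons x t ih =>
      by_cases hp : p x = true
      · have hq : q x = false := by
          by_cases h : q x = true
          · exact absurd ⟨hp, h⟩ (hd x)
          · simpa using h
        simp [hp, hq, ih]; omega
      · simp only [Bool.not_eq_true] at hp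
        by_cases hq : q x = true
        · simp [hp, hq, ih]; omega
        · simp only [Bool.not_eq_true] at hq
          simp [hp, hq, ih]

lemma sum_filter_or_disjoint (p q : Int → Bool) (hd : ∀ c, ¬(p c = true ∧ q c = true)) :
    ∀ (l : List Int), (l.filter (fun c => p c || q c)).sum = (l.filter p).sum + (l.filter q).sum := by
  intro l
  induction l with
  | nil => simp
  | cons x t ih =>
      by_cases hp : p x = true
      · have hq : q x = false := by
          by_cases h : q x = true
          · exact absurd ⟨hp, h⟩ (hd x)
          · simpa using h
        simp [hp, hq, ih]; ring
      · simp only [Bool.not_eq_true] at hp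
        by_cases hq : q x = true
        · simp [hp, hq, ih]; ring
        · simp only [Bool.not_eq_true] at hq
          simp [hp, hq, ih]

lemma cntLt_step (cells : List Int) (h h' : Int) (hlt : h < h')
    (hmid : ∀ c ∈ cells, c < h' → c ≤ h) :
    cntLt cells h' = cntLt cells h + (cells.count h : Int) := by
  unfold cntLt
  rw [filter_lt_split cells h h' hlt hmid]
  rw [← List.countP_eq_length_filter, ← List.countP_eq_length_filter,
      countP_or_disjoint (fun c => decide (c < h)) (fun c => c == h) (by intro c ⟨h1, h2⟩; simp at h1 h2; omega)]
  rw [List.count_eq_countP]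
  push_cast
  ring

lemma sLt_step (cells : List Int) (h h' : Int) (hlt : h < h')
    (hmid : ∀ c ∈ cells, c < h' → c ≤ h) :
    sLt cells h' = sLt cells h + h * (cells.count h : Int) := by
  unfold sLt
  rw [filter_lt_split cells h h' hlt hmid]
  rw [sum_filter_or_disjoint (fun c => decide (c < h)) (fun c => c == h) (by intro c ⟨h1, h2⟩; simp at h1 h2; omega)]
  rw [List.filter_beq h]
  simp [List.sum_replicate, mul_comm]

-- the central loop lemma: A's incremental sweep = B's recomputed sweep
lemma loop_agree (cells : List Int) (N P Q : Int) :
    ∀ (hs : List Int) (prev stacked cost : Int),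
      hs.Pairwise (fun a b => a < b) →
      (∀ h, hs.head? = some h → ∀ c ∈ cells, c < h ∨ c ∈ hs) →
      (∀ h, hs.head? = some h → stacked = cntLt cells h) →
      (∀ h, hs.head? = some h →
        cost = Q * (cells.sum - N * prev) + (P + Q) * (prev * cntLt cells h - sLt cells h)) →
      solutionLoop N P Q (hs.map (fun k => (k, (cells.count k : Int)))) stacked cost cost prev
        = altLoop cells N cells.sum P Q hs cost := by
  intro hs
  induction hs with
  | nil => intro prev stacked cost _ _ _ _; rfl
  | cons h rest ih =>
      intro prev stacked cost hpw hcover hstack hcost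
      have hstack' := hstack h rfl
      have hcost' := hcost h rfl
      have hrest_gt : ∀ x ∈ rest, h < x := by
        intro x hx; exact (List.pairwise_cons.mp hpw).1 x hx
      have hheadlt : ∀ h', rest.head? = some h' → h < h' :=
        fun h' hh' => hrest_gt h' (List.mem_of_mem_head? (by simp [hh']))
      have hmid : ∀ h', rest.head? = some h' → ∀ c ∈ cells, c < h' → c ≤ h := by
        intro h' hh' c hc hlt
        rcases hcover h rfl c hc with hlo | hin
        · omega
        · rcases List.mem_cons.mp hin with rfl | hr
          · omega
          · rcases rest with _ | ⟨r0, rrest⟩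
            · simp at hh'
            · have hr0 : r0 = h' := by simpa using hh'
              subst hr0
              rcases List.mem_cons.mp hr with rfl | hr2
              · omega
              · have := (List.pairwise_cons.mp (List.pairwise_cons.mp hpw).2).1 c hr2
                omega
      -- A's incremental cost update lands exactly on B's recomputed cost
      have hkey : cost + (h - prev) * (-Q * (N - stacked) + P * stacked)
          = altCost cells N cells.sum P Q h := by
        rw [altCost_eq, hcost', hstack']
        ring
      simp only [List.map_cons, solutionLoop, altLoop, hkey]
      by_cases hbr : cost < altCost cells N cells.sum P Q h
      · simp [hbr]
      · simp only [hbr, if_false]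
        -- recursive call: re-establish the invariants at the next head
        have hnext := ih h (stacked + (cells.count h : Int)) (altCost cells N cells.sum P Q h)
          (List.pairwise_cons.mp hpw).2
          (by
            intro h' hh' c hc
            rcases hcover h rfl c hc with hlo | hin
            · left
              have := hheadlt h' hh'
              omega
            · rcases List.mem_cons.mp hin with rfl | hr
              · left; exact hheadlt h' hh'
              · right; exact hr)
          (by
            intro h' hh'
            rw [cntLt_step cells h h' (hheadlt h' hh') (hmid h' hh'), hstack'])
          (by
            intro h' hh'
            have hlt : h < h' := hheadlt h' hh'
            rw [altCost_eq, cntLt_step cells h h' hlt (hmid h' hh'),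
                sLt_step cells h h' hlt (hmid h' hh')]
            ring)
        exact hnext

-- ===== VERDICT (by name: the statement is the Claim_ definition above) =====
theorem solution_spec : Claim_equal_solution := by
  intro land P Q _
  unfold Spec_solution solution solution_alt
  simp only []
  set cells := land.flatMap (fun row => row) with hcells
  set N := ((land.length : Int)) ^ 2 with hN
  rw [sorted_counter_items]
  set hs := PySem.List.sorted (PySem.Set.ofList cells) (fun x => x) with hhs
  have hpw : hs.Pairwise (fun a b => a < b) := PySem.List.sorted_ofList_pairwise_lt cells
  have hmemhs : ∀ c ∈ cells, c ∈ hs := by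
    intro c hc
    rw [hhs, PySem.List.mem_sorted]
    exact (PySem.Set.mem_ofList cells c).mpr hc
  have hhead : ∀ h, hs.head? = some h → ∀ c ∈ cells, ¬ c < h := by
    intro h hh c hc
    have hle : h ≤ c := by
      rcases heq : hs with _ | ⟨h0, t⟩
      · rw [heq] at hh; simp at hh
      · rw [heq] at hh; simp at hh
        subst hh
        have hsrt : PySem.List.sorted (PySem.Set.ofList cells) (fun x => x) = h0 :: t := by
          rw [← hhs, heq]
        exact PySem.List.key_head_sorted_le (PySem.Set.ofList cells) (fun x => x) hsrt c
          ((PySem.Set.mem_ofList cells c).mpr hc)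
    omega
  have hzero : ∀ h, hs.head? = some h → cntLt cells h = 0 ∧ sLt cells h = 0 := by
    intro h hh
    have : cells.filter (fun c => c < h) = [] := by
      apply List.filter_eq_nil_iff.mpr
      intro c hc
      simpa using hhead h hh c hc
    constructor <;> simp [cntLt, sLt, this]
  have := loop_agree cells N P Q hs 0 0 (Q * cells.sum) hpw
    (fun h hh c hc => Or.inr (hmemhs c hc))
    (fun h hh => ((hzero h hh).1).symm)
    (fun h hh => by rw [(hzero h hh).1, (hzero h hh).2]; ring)
  exact this
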